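-- pv_equiv track=rewrite | github.com/taiduydinh/pypm | codes/meit.py | sameAs
-- ===== SOURCE A (Python) =====
-- from typing import List, Optional, Set, Iterable
--
-- def sameAs(itemset1: List[int], itemsets2: List[int], posRemoved: int) -> int:
--     j = 0
--     for i in range(len(itemset1)):
--         if j == posRemoved:
--             j += 1
--         if itemset1[i] == itemsets2[j]:
--             j += 1
--         elif itemset1[i] > itemsets2[j]:
--             return 1
--         else:
--             return -1
--     return 0
-- ===== SOURCE B (Python) =====
-- def sameAs(itemset1, itemsets2, posRemoved):
--     filtered = [x for idx, x in enumerate(itemsets2) if idx != posRemoved]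
--     t = tuple(itemset1)
--     f = tuple(filtered[:len(itemset1)])
--     return (t > f) - (t < f)
-- ===== Notes on version B (the rewrite author's own statement) =====
-- stated objective: idiomatic
-- what changed: B has no element-by-element comparison loop and no early returns at all: it builds the comparison list (itemsets2 with index posRemoved dropped via enumerate), truncates it to len(itemset1) by slicing, and delegates the whole three-way comparison to Python's built-in lexicographic tuple ordering with the (t > f) - (t < f) idiom, where A runs a stateful walk with a j counter bumped at posRemoved and on every match.
import Mathlib
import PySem

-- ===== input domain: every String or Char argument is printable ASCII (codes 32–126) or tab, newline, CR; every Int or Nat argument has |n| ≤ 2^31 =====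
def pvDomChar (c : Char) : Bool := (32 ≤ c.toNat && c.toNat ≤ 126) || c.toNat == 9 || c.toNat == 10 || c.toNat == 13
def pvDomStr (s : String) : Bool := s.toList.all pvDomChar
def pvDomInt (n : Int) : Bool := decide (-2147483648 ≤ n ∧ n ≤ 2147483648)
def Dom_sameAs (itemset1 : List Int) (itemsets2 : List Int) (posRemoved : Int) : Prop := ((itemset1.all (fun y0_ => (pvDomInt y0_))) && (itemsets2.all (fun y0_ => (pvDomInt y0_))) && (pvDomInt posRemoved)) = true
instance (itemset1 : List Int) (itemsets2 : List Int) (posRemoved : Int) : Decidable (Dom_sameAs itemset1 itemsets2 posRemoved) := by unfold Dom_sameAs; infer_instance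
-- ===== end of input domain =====

-- B replaces A's stateful comparison loop entirely: it drops index posRemoved from itemsets2,
-- truncates to itemset1's length, and delegates the three-way result to Python's built-in
-- lexicographic tuple ordering via (t > f) - (t < f); objective: idiomatic.

-- ===== PORT A =====
-- A's loop: state j, skip when j == posRemoved, compare, advance on equality.
def sameAsGoA (itemsets2 : List Int) (posRemoved : Int) : List Int → Int → Int
  | [], _ => 0
  | x :: xs, j =>
    let j' := if j = posRemoved then j + 1 else j
    match PySem.List.pyGet? itemsets2 j' with
    | none => 0  -- Python raises IndexError here; such inputs are outside Pre_sameAs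
    | some y =>
      if x = y then sameAsGoA itemsets2 posRemoved xs (j' + 1)
      else if x > y then 1
      else -1

def sameAs (itemset1 : List Int) (itemsets2 : List Int) (posRemoved : Int) : Int :=
  sameAsGoA itemsets2 posRemoved itemset1 0

-- ===== PORT B =====
-- Python's built-in tuple comparison t > f, ported exactly: first unequal element decides,
-- a proper prefix is smaller.
def lexGt : List Int → List Int → Bool
  | [], _ => false
  | _ :: _, [] => true
  | x :: xs, y :: ys => x > y || (x == y && lexGt xs ys)

-- Python's built-in tuple comparison t < f, ported exactly (mirror of lexGt).
def lexLt : List Int → List Int → Bool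
  | [], [] => false
  | [], _ :: _ => true
  | _ :: _, [] => false
  | x :: xs, y :: ys => x < y || (x == y && lexLt xs ys)

def sameAs_alt (itemset1 : List Int) (itemsets2 : List Int) (posRemoved : Int) : Int :=
  let filtered : List Int :=
    ((PySem.List.enumerate itemsets2).filter (fun p => p.1 != posRemoved)).map Prod.snd
  let t := itemset1
  let f := PySem.List.slice filtered none (some (itemset1.length : Int))  -- filtered[:len(itemset1)]
  (if lexGt t f then (1 : Int) else 0) - (if lexLt t f then (1 : Int) else 0)

-- ===== PRECONDITION & SPEC =====
-- itemsets2 with position posRemoved removed (removal only when 0 ≤ posRemoved < length,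
-- exactly as Python's skip-only-when-reached behaviour); used to state Pre_ in closed form.
def pvDrop (ys : List Int) (pos : Int) : List Int :=
  if 0 ≤ pos ∧ pos < ys.length then ys.eraseIdx pos.toNat else ys

-- Pre_ excludes exactly the inputs where A raises IndexError: those where itemset1 runs past
-- the end of the (posRemoved-dropped) itemsets2 without hitting a strict mismatch first.
def Pre_sameAs (itemset1 : List Int) (itemsets2 : List Int) (posRemoved : Int) : Prop :=
  itemset1.length ≤ (pvDrop itemsets2 posRemoved).length ∨
    ∃ i ∈ List.range itemset1.length,
      i < (pvDrop itemsets2 posRemoved).length ∧ itemset1[i]? ≠ (pvDrop itemsets2 posRemoved)[i]?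
instance (itemset1 : List Int) (itemsets2 : List Int) (posRemoved : Int) : Decidable (Pre_sameAs itemset1 itemsets2 posRemoved) := by unfold Pre_sameAs; infer_instance

def pvWitness_sameAs : List Int × List Int × Int := ([1, 2], [1, 0, 2], 1)

def Spec_sameAs (itemset1 : List Int) (itemsets2 : List Int) (posRemoved : Int) (out : Int) : Prop := out = sameAs_alt itemset1 itemsets2 posRemoved
instance (itemset1 : List Int) (itemsets2 : List Int) (posRemoved : Int) (out : Int) : Decidable (Spec_sameAs itemset1 itemsets2 posRemoved out) := by unfold Spec_sameAs; infer_instance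

-- ===== CLAIM (what is proved, stated in full; the proofs are below) =====
def Claim_equal_sameAs : Prop := ∀ (itemset1 : List Int) (itemsets2 : List Int) (posRemoved : Int), Dom_sameAs itemset1 itemsets2 posRemoved → Pre_sameAs itemset1 itemsets2 posRemoved → Spec_sameAs itemset1 itemsets2 posRemoved (sameAs itemset1 itemsets2 posRemoved)
-- ===== LEMMAS AND PROOFS =====

-- three-way comparison of itemset1 against the dropped list, truncation folded in:
-- proof-side characterisation of B's subtraction of the two boolean lexicographic tests
def pvCmp : List Int → List Int → Int
  | [], _ => 0
  | _ :: _, [] => 1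
  | x :: xs, y :: ys => if x > y then 1 else if x < y then -1 else pvCmp xs ys

lemma lex_sub (t f : List Int) :
    (if lexGt t (f.take t.length) then (1 : Int) else 0)
      - (if lexLt t (f.take t.length) then (1 : Int) else 0) = pvCmp t f := by
  induction t generalizing f with
  | nil => cases f <;> simp [lexGt, lexLt, pvCmp]
  | cons x xs ih =>
    cases f with
    | nil => simp [lexGt, lexLt, pvCmp]
    | cons y ys =>
      simp only [List.length_cons, List.take_succ_cons, lexGt, lexLt, pvCmp]
      rcases lt_trichotomy x y with h | h | h
      · simp [h, ne_of_lt h, not_lt_of_gt h]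
      · subst h
        simpa [lt_irrefl] using ih ys
      · simp [h, ne_of_gt h, not_lt_of_gt h]

-- B's filtered list is itemsets2 with index posRemoved dropped (generalised over the
-- enumeration start s).
lemma filt_enum (ys : List Int) (pos : Int) (s : Int) :
    ((PySem.List.enumerate ys s).filter (fun p => p.1 != pos)).map Prod.snd
      = if s ≤ pos ∧ pos < s + ys.length then ys.eraseIdx (pos - s).toNat else ys := by
  induction ys generalizing s with
  | nil =>
    rw [PySem.List.enumerate_nil]
    simp only [List.filter_nil, List.map_nil, List.eraseIdx_nil, List.length_nil]
    split_ifs <;> rfl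
  | cons y ys ih =>
    rw [PySem.List.enumerate_cons, List.filter_cons]
    by_cases hs : s = pos
    · rw [if_neg (by simp [hs]), ih, if_neg (by omega)]
      rw [if_pos (by simp only [List.length_cons]; push_cast; constructor <;> omega)]
      have h0 : (pos - s).toNat = 0 := by omega
      rw [h0, List.eraseIdx_cons_zero]
    · rw [if_pos (by simp [bne_iff_ne]; exact hs), List.map_cons, ih]
      by_cases hc : s + 1 ≤ pos ∧ pos < s + 1 + (ys.length : Int)
      · rw [if_pos hc, if_pos (by simp only [List.length_cons]; push_cast; constructor <;> omega)]
        have hk : (pos - s).toNat = (pos - (s + 1)).toNat + 1 := by omega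
        rw [hk, List.eraseIdx_cons_succ]
      · rw [if_neg hc, if_neg (by simp only [List.length_cons]; push_cast; omega)]

lemma filtered_eq_pvDrop (ys : List Int) (pos : Int) :
    ((PySem.List.enumerate ys).filter (fun p => p.1 != pos)).map Prod.snd = pvDrop ys pos := by
  rw [filt_enum]
  unfold pvDrop
  by_cases h : 0 ≤ pos ∧ pos < (ys.length : Int)
  · rw [if_pos (by constructor <;> omega), if_pos h]
    congr 1
    omega
  · rw [if_neg (by omega), if_neg h]

-- reading position i of the dropped list = reading A's effective index in itemsets2
lemma pvDrop_get (ys : List Int) (pos : Int) (i : Nat) :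
    (pvDrop ys pos)[i]?
      = PySem.List.pyGet? ys ((i : Int) + (if 0 ≤ pos ∧ pos ≤ (i : Int) then 1 else 0)) := by
  unfold pvDrop
  by_cases h : 0 ≤ pos ∧ pos < (ys.length : Int)
  · rw [if_pos h]
    rw [List.getElem?_eraseIdx]
    by_cases hi : 0 ≤ pos ∧ pos ≤ (i : Int)
    · rw [if_neg (by omega), if_pos hi]
      have : ((i : Int) + 1) = ((i + 1 : Nat) : Int) := by push_cast; ring
      rw [this, PySem.List.pyGet?_natCast]
    · rw [if_pos (by omega), if_neg hi]
      simp
  · rw [if_neg h]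
    by_cases hi : 0 ≤ pos ∧ pos ≤ (i : Int)
    · rw [if_pos hi]
      have hnone1 : ys[i]? = none := by
        rw [List.getElem?_eq_none]; omega
      have : ((i : Int) + 1) = ((i + 1 : Nat) : Int) := by push_cast; ring
      rw [this, PySem.List.pyGet?_natCast, hnone1, List.getElem?_eq_none]
      omega
    · rw [if_neg hi]
      simp

-- main loop correspondence: A's stateful walk at position i (with j = i + [0 ≤ pos < i])
-- equals the three-way comparison of the rest of itemset1 against the dropped list from i on,
-- under the no-IndexError invariant carried down from Pre_.
lemma go_eq (ys : List Int) (pos : Int) (xs : List Int) (i : Nat)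
    (h : xs.length + i ≤ (pvDrop ys pos).length ∨
      ∃ k, k < xs.length ∧ i + k < (pvDrop ys pos).length ∧
        xs[k]? ≠ (pvDrop ys pos)[i + k]?) :
    sameAsGoA ys pos xs ((i : Int) + (if 0 ≤ pos ∧ pos < (i : Int) then 1 else 0))
      = pvCmp xs ((pvDrop ys pos).drop i) := by
  induction xs generalizing i with
  | nil => simp [sameAsGoA, pvCmp]
  | cons x xs ih =>
    rw [sameAsGoA]
    have hj : (if ((i : Int) + (if 0 ≤ pos ∧ pos < (i : Int) then 1 else 0)) = pos
          then ((i : Int) + (if 0 ≤ pos ∧ pos < (i : Int) then 1 else 0)) + 1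
          else ((i : Int) + (if 0 ≤ pos ∧ pos < (i : Int) then 1 else 0)))
        = (i : Int) + (if 0 ≤ pos ∧ pos ≤ (i : Int) then 1 else 0) := by
      split_ifs <;> omega
    rw [hj, ← pvDrop_get]
    cases hget : (pvDrop ys pos)[i]? with
    | none =>
      exfalso
      have hlen : (pvDrop ys pos).length ≤ i := by
        rw [List.getElem?_eq_none_iff] at hget; exact hget
      rcases h with h | ⟨k, _, hk, _⟩
      · simp only [List.length_cons] at h; omega
      · omega
    | some y =>
      obtain ⟨hi, hy⟩ := List.getElem?_eq_some_iff.mp hget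
      have hdrop : (pvDrop ys pos).drop i = y :: (pvDrop ys pos).drop (i + 1) := by
        rw [List.drop_eq_getElem_cons hi, hy]
      rw [hdrop, pvCmp]
      dsimp only
      by_cases hxy : x = y
      · subst hxy
        rw [if_pos rfl, if_neg (lt_irrefl x), if_neg (lt_irrefl x)]
        have hstep : ((i : Int) + (if 0 ≤ pos ∧ pos ≤ (i : Int) then 1 else 0)) + 1
            = ((i + 1 : Nat) : Int) + (if 0 ≤ pos ∧ pos < ((i + 1 : Nat) : Int) then 1 else 0) := by
          push_cast; split_ifs <;> omega
        rw [hstep, ih (i + 1) ?_]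
        rcases h with h | ⟨k, hk1, hk2, hk3⟩
        · left; simp only [List.length_cons] at h; omega
        · right
          cases k with
          | zero =>
            exfalso
            apply hk3
            simp only [Nat.add_zero, List.getElem?_cons_zero]
            exact hget.symm
          | succ k' =>
            refine ⟨k', by simpa using hk1, ?_, ?_⟩
            · have : i + 1 + k' = i + (k' + 1) := by omega
              rw [this]; exact hk2
            · have : i + 1 + k' = i + (k' + 1) := by omega
              rw [this]
              simpa using hk3
      · rcases lt_trichotomy x y with hlt | heq | hgt
        · rw [if_neg hxy, if_neg (not_lt_of_gt hlt), if_neg (not_lt_of_gt hlt), if_pos hlt]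
        · exact absurd heq hxy
        · rw [if_neg hxy, if_pos hgt, if_pos hgt]

-- ===== VERDICT (by name: the statements are the Claim_ definitions above) =====
theorem sameAs_spec : Claim_equal_sameAs := by
  intro itemset1 itemsets2 posRemoved _ hpre
  unfold Spec_sameAs sameAs sameAs_alt
  simp only [filtered_eq_pvDrop, PySem.List.slice_to_natCast, lex_sub]
  have hinv : itemset1.length + 0 ≤ (pvDrop itemsets2 posRemoved).length ∨
      ∃ k, k < itemset1.length ∧ 0 + k < (pvDrop itemsets2 posRemoved).length ∧
        itemset1[k]? ≠ (pvDrop itemsets2 posRemoved)[0 + k]? := by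
    rcases hpre with h | ⟨k, hk1, hk2, hk3⟩
    · left; omega
    · right
      refine ⟨k, List.mem_range.mp hk1, ?_, ?_⟩
      · simpa using hk2
      · simpa using hk3
  have h := go_eq itemsets2 posRemoved itemset1 0 hinv
  simp only [Nat.cast_zero] at h
  rw [if_neg (by omega), add_zero] at h
  rw [h, List.drop_zero]
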